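-- pv_equiv track=rewrite | github.com/scottonanski/persistent-mind-model | duel.py | _ngram_set
-- ===== SOURCE A (Python) =====
-- def _ngram_set(text: str):
--     words = (text or "").lower().split()
--     grams = set()
--     for n in (2, 3, 4):
--         for i in range(len(words) - n + 1):
--             gram = ' '.join(words[i:i+n])
--             if all(len(w) > 2 for w in words[i:i+n]):
--                 grams.add(gram)
--     return grams
-- ===== SOURCE B (Python) =====
-- def _ngram_set(text: str):
--     words = (text or "").lower().split()
--     # single segmentation pass: maximal runs of words with len > 2
--     runs = []
--     cur = []
--     for w in words:
--         if len(w) > 2: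
--             cur.append(w)
--         else:
--             if cur:
--                 runs.append(cur)
--             cur = []
--     if cur:
--         runs.append(cur)
--     grams = set()
--     for n in (2, 3, 4):
--         for run in runs:
--             for i in range(len(run) - n + 1):
--                 grams.add(' '.join(run[i:i+n]))
--     return grams
-- ===== Notes on version B (the rewrite author's own statement) =====
-- stated objective: alternative
-- what changed: Instead of testing every window with an all() scan, B segments the word list once into maximal runs of words longer than 2 characters and then enumerates all 2/3/4-grams inside each run unconditionally.
import Mathlib
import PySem

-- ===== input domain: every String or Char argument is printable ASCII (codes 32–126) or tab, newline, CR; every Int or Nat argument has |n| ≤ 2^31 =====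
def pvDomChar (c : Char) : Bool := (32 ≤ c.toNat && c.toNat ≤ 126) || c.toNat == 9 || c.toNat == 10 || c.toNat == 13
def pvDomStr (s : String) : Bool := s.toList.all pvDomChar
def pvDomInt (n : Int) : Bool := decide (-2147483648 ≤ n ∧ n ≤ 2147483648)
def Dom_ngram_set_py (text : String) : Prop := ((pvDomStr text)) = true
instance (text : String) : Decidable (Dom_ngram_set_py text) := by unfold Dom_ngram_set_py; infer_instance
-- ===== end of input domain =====

-- B replaces A's per-window all() validity test by one segmentation pass into maximal
-- runs of words longer than 2 chars, then enumerates every 2/3/4-gram inside each run.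

-- ===== PORT A =====
def ngram_set_py (text : String) : List String :=
  let words := PySem.Str.split₀ (PySem.Str.lower (if text = "" then "" else text))
  ([2, 3, 4] : List Int).foldl (fun grams n =>
    (PySem.List.pyRange 0 ((words.length : Int) - n + 1) 1).foldl (fun grams i =>
      let gram := PySem.Str.join " " (PySem.List.slice words (some i) (some (i + n)))
      if (PySem.List.slice words (some i) (some (i + n))).all (fun w => 2 < PySem.Str.len w)
      then PySem.Set.add grams gram else grams) grams) PySem.Set.empty

-- ===== PORT B =====
def ngram_set_py_alt (text : String) : List String :=
  let words := PySem.Str.split₀ (PySem.Str.lower (if text = "" then "" else text))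
  let st := words.foldl (fun (st : List (List String) × List String) w =>
      if 2 < PySem.Str.len w then (st.1, st.2 ++ [w])
      else ((if st.2 = [] then st.1 else st.1 ++ [st.2]), [])) ([], [])
  let runs := if st.2 = [] then st.1 else st.1 ++ [st.2]
  ([2, 3, 4] : List Int).foldl (fun grams n =>
    runs.foldl (fun grams run =>
      (PySem.List.pyRange 0 ((run.length : Int) - n + 1) 1).foldl (fun grams i =>
        PySem.Set.add grams (PySem.Str.join " " (PySem.List.slice run (some i) (some (i + n)))))
        grams) grams) PySem.Set.empty

-- ===== PRECONDITION & SPEC =====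
def Spec_ngram_set_py (text : String) (out : List String) : Prop := out = ngram_set_py_alt text
instance (text : String) (out : List String) : Decidable (Spec_ngram_set_py text out) := by unfold Spec_ngram_set_py; infer_instance

-- ===== CLAIM (what is proved, stated in full; the proofs are below) =====
def Claim_equal_ngram_set_py : Prop := ∀ (text : String), Dom_ngram_set_py text → Spec_ngram_set_py text (ngram_set_py text)

-- ===== LEMMAS AND PROOFS =====

-- word predicate: length > 2
def pvP (w : String) : Bool := 2 < PySem.Str.len w

-- maximal runs of pvP-words, via span recursion
def pvRuns : List String → List (List String)
  | [] => []
  | w :: ws =>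
    if pvP w then (w :: ws.takeWhile pvP) :: pvRuns (ws.dropWhile pvP)
    else pvRuns ws
termination_by l => l.length
decreasing_by
  · simpa using Nat.lt_succ_of_le (ws.length_dropWhile_le pvP)
  · simp

-- all windows of size m, left to right
def pvWinds (m : Nat) (l : List String) : List (List String) :=
  (List.range (l.length + 1 - m)).map (fun i => (l.drop i).take m)

theorem pvWinds_nil (m : Nat) (hm : 1 ≤ m) : pvWinds m [] = [] := by
  unfold pvWinds
  have : 0 + 1 - m = 0 := by omega
  simp [this]

theorem pvWinds_cons (m : Nat) (w : String) (t : List String) (h : m ≤ t.length + 1) :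
    pvWinds m (w :: t) = (w :: t).take m :: pvWinds m t := by
  unfold pvWinds
  have h1 : (w :: t).length + 1 - m = (t.length + 1 - m) + 1 := by simp; omega
  rw [h1, List.range_succ_eq_map]
  simp [List.map_map, Function.comp]

theorem pvWinds_big (m : Nat) (l : List String) (h : l.length + 1 ≤ m) : pvWinds m l = [] := by
  unfold pvWinds
  have : l.length + 1 - m = 0 := by omega
  simp [this]

theorem pvKey_append (m : Nat) (hm : 1 ≤ m) :
    ∀ (r rest : List String), (∀ w ∈ r, pvP w = true) →
    (∀ x xs, rest = x :: xs → pvP x = false) →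
    (pvWinds m (r ++ rest)).filter (·.all pvP) = pvWinds m r ++ (pvWinds m rest).filter (·.all pvP) := by
  intro r
  induction r with
  | nil => intro rest _ _; simp [pvWinds_nil m hm]
  | cons w r' ih =>
    intro rest hr hrest
    by_cases hbig : (r' ++ rest).length + 1 + 1 ≤ m
    · rw [show (w :: r') ++ rest = w :: (r' ++ rest) by simp,
        pvWinds_big m _ (by simpa using hbig),
        pvWinds_big m (w :: r') (by simp at hbig ⊢; omega)]
      rw [pvWinds_big m rest (by simp at hbig ⊢; omega)]
      simp
    · push Not at hbig
      have hle : m ≤ (r' ++ rest).length + 1 := by omega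
      rw [show (w :: r') ++ rest = w :: (r' ++ rest) by simp, pvWinds_cons m w _ hle]
      by_cases hsmall : m ≤ r'.length + 1
      · -- window fits inside the run
        have htake : (w :: (r' ++ rest)).take m = (w :: r').take m := by
          cases m with
          | zero => simp
          | succ k =>
            simp only [List.take_succ_cons]
            rw [List.take_append_of_le_length (by omega)]
        have hall : ((w :: r').take m).all pvP = true := by
          rw [List.all_eq_true]
          intro x hx
          exact hr x (List.mem_of_mem_take hx)
        rw [List.filter_cons, htake, hall]
        rw [if_pos rfl]
        rw [pvWinds_cons m w r' hsmall, ih rest (fun x hx => hr x (List.mem_cons_of_mem w hx)) hrest]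
        simp
      · -- window crosses into rest: its last element fails pvP
        push Not at hsmall
        have hrestne : rest ≠ [] := by
          intro hc; subst hc; simp at hle; omega
        obtain ⟨x, xs, hx⟩ := List.exists_cons_of_ne_nil hrestne
        have hpx : pvP x = false := hrest x xs hx
        have hall : ((w :: (r' ++ rest)).take m).all pvP = false := by
          cases m with
          | zero => omega
          | succ k =>
            simp only [List.take_succ_cons]
            rw [List.take_append]
            have hk : k - r'.length ≥ 1 := by omega
            subst hx
            have : (x :: xs).take (k - r'.length) = x :: xs.take (k - r'.length - 1) := by
              cases hkk : k - r'.length with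
              | zero => omega
              | succ j => simp
            rw [this]
            simp [hpx]
        rw [List.filter_cons, hall]
        simp only [Bool.false_eq_true, if_false]
        rw [ih rest (fun x hx => hr x (List.mem_cons_of_mem w hx)) hrest]
        rw [pvWinds_big m (w :: r') (by simp; omega), pvWinds_big m r' (by omega)]

theorem pvCons_bad (m : Nat) (hm : 1 ≤ m) (w : String) (ws : List String) (hp : ¬ pvP w = true) :
    (pvWinds m (w :: ws)).filter (·.all pvP) = (pvWinds m ws).filter (·.all pvP) := by
  by_cases h : m ≤ ws.length + 1
  · rw [pvWinds_cons m w ws h]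
    have hall : ((w :: ws).take m).all pvP = false := by
      cases m with
      | zero => omega
      | succ k => simp [List.take_succ_cons, hp]
    rw [List.filter_cons, hall]
    simp
  · rw [pvWinds_big m (w :: ws) (by simp; omega), pvWinds_big m ws (by omega)]

theorem pvCore (m : Nat) (hm : 1 ≤ m) :
    ∀ (l : List String),
    (pvWinds m l).filter (·.all pvP) = (pvRuns l).flatMap (pvWinds m) := by
  intro l
  induction hl : l.length using Nat.strong_induction_on generalizing l with
  | _ N ih =>
  match l with
  | [] => simp [pvWinds_nil m hm, pvRuns]
  | w :: ws =>
    by_cases hp : pvP w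
    · rw [pvRuns]
      simp only [if_pos hp]
      have hsplit : w :: ws = (w :: ws.takeWhile pvP) ++ ws.dropWhile pvP := by
        simp [List.takeWhile_append_dropWhile]
      have hr : ∀ x ∈ w :: ws.takeWhile pvP, pvP x = true := by
        intro x hx
        rcases List.mem_cons.mp hx with h | h
        · subst h; exact hp
        · exact List.mem_takeWhile_imp h
      have hrest : ∀ x xs, ws.dropWhile pvP = x :: xs → pvP x = false := by
        intro x xs hx
        have := List.head?_dropWhile_not pvP ws
        rw [hx] at this
        simp at this
        exact this
      rw [hsplit, pvKey_append m hm _ _ hr hrest]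
      rw [List.flatMap_cons]
      congr 1
      exact ih (ws.dropWhile pvP).length
        (by subst hl; simpa using Nat.lt_succ_of_le (ws.length_dropWhile_le pvP)) _ rfl
    · rw [pvRuns]
      simp only [if_neg hp]
      rw [pvCons_bad m hm w ws hp]
      exact ih ws.length (by subst hl; simp) ws rfl

-- generic fold lemmas
theorem pvFoldl_add_if {α β : Type} [BEq β] (c : α → Bool) (g : α → β) :
    ∀ (l : List α) (s : PySem.Set β),
    l.foldl (fun s x => if c x then PySem.Set.add s (g x) else s) s
      = ((l.filter c).map g).foldl PySem.Set.add s := by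
  intro l
  induction l with
  | nil => intro s; rfl
  | cons x xs ih =>
    intro s
    by_cases h : c x <;> simp [h, List.foldl_cons, ih]

-- named copies of the port bodies (definitionally equal to the ports; used only in proofs)
def pvWords (text : String) : List String :=
  PySem.Str.split₀ (PySem.Str.lower (if text = "" then "" else text))

def pvA (ws : List String) : List String :=
  ([2, 3, 4] : List Int).foldl (fun grams n =>
    (PySem.List.pyRange 0 ((ws.length : Int) - n + 1) 1).foldl (fun grams i =>
      if (PySem.List.slice ws (some i) (some (i + n))).all (fun w => 2 < PySem.Str.len w)
      then PySem.Set.add grams (PySem.Str.join " " (PySem.List.slice ws (some i) (some (i + n))))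
      else grams) grams) PySem.Set.empty

def pvStep (st : List (List String) × List String) (w : String) :
    List (List String) × List String :=
  if 2 < PySem.Str.len w then (st.1, st.2 ++ [w])
  else ((if st.2 = [] then st.1 else st.1 ++ [st.2]), [])

def pvFin (st : List (List String) × List String) : List (List String) :=
  if st.2 = [] then st.1 else st.1 ++ [st.2]

def pvB (ws : List String) : List String :=
  ([2, 3, 4] : List Int).foldl (fun grams n =>
    (pvFin (ws.foldl pvStep ([], []))).foldl (fun grams run =>
      (PySem.List.pyRange 0 ((run.length : Int) - n + 1) 1).foldl (fun grams i =>
        PySem.Set.add grams (PySem.Str.join " " (PySem.List.slice run (some i) (some (i + n)))))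
        grams) grams) PySem.Set.empty

theorem pvA_eq (text : String) : ngram_set_py text = pvA (pvWords text) := rfl
theorem pvB_eq (text : String) : ngram_set_py_alt text = pvB (pvWords text) := rfl

-- the segmentation loop computes pvRuns
def pvCont (c : List String) : List String → List (List String)
  | [] => if c = [] then [] else [c]
  | w :: ws => if pvP w then pvCont (c ++ [w]) ws else (if c = [] then [] else [c]) ++ pvCont [] ws

theorem pvP_iff (w : String) : pvP w = true ↔ 2 < PySem.Str.len w := by
  simp [pvP]

theorem pvFoldl_congr {α β : Type} (l : List α) (f g : β → α → β) (s : β)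
    (h : ∀ s a, f s a = g s a) : l.foldl f s = l.foldl g s := by
  induction l generalizing s with
  | nil => rfl
  | cons x xs ih => rw [List.foldl_cons, List.foldl_cons, h, ih]

theorem pvFoldl_cont : ∀ (l : List String) (rs : List (List String)) (c : List String),
    pvFin (l.foldl pvStep (rs, c)) = rs ++ pvCont c l := by
  intro l
  induction l with
  | nil =>
    intro rs c
    by_cases h : c = [] <;> simp [pvFin, pvCont, h]
  | cons w ws ih =>
    intro rs c
    by_cases hp : 2 < PySem.Str.len w
    · rw [List.foldl_cons, show pvStep (rs, c) w = (rs, c ++ [w]) from by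
        simp only [pvStep, if_pos hp], ih, pvCont, if_pos ((pvP_iff w).mpr hp)]
    · rw [List.foldl_cons, show pvStep (rs, c) w = ((if c = [] then rs else rs ++ [c]), []) from by
        simp only [pvStep, if_neg hp], ih, pvCont,
        if_neg (fun h => hp ((pvP_iff w).mp h))]
      by_cases h : c = [] <;> simp [h]

theorem pvCont_spec : ∀ l : List String,
    (∀ c : List String, c ≠ [] →
        pvCont c l = (c ++ l.takeWhile pvP) :: pvRuns (l.dropWhile pvP))
      ∧ pvCont [] l = pvRuns l := by
  intro l
  induction l with
  | nil =>
    exact ⟨fun c hc => by simp [pvCont, hc, pvRuns], by simp [pvCont, pvRuns]⟩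
  | cons w ws ih =>
    obtain ⟨ihr, ihn⟩ := ih
    by_cases hp : pvP w
    · constructor
      · intro c hc
        rw [pvCont, if_pos hp, ihr (c ++ [w]) (by simp), List.takeWhile_cons_of_pos hp,
          List.dropWhile_cons_of_pos hp]
        simp
      · rw [pvCont, if_pos hp, List.nil_append, ihr [w] (by simp), pvRuns, if_pos hp]
        simp
    · constructor
      · intro c hc
        rw [pvCont, if_neg hp, List.takeWhile_cons_of_neg hp, List.dropWhile_cons_of_neg hp,
          if_neg hc, ihn, pvRuns, if_neg hp]
        simp
      · rw [pvCont, if_neg hp, pvRuns, if_neg hp]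
        simpa using ihn

theorem pvFin_eq (ws : List String) : pvFin (ws.foldl pvStep ([], [])) = pvRuns ws := by
  rw [pvFoldl_cont ws [] [], (pvCont_spec ws).2]
  simp

-- index range of the window loops as a List.range
theorem pvRange_eq (len k : Nat) :
    PySem.List.pyRange 0 ((len : Int) - (k : Int) + 1) 1
      = (List.range (len + 1 - k)).map (Nat.cast : Nat → Int) := by
  rw [PySem.List.pyRange_one]
  have h : ((len : Int) - (k : Int) + 1 - 0).toNat = len + 1 - k := by omega
  rw [h]
  exact List.map_congr_left (fun a _ => by omega)

-- B's unconditional inner window loop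
theorem pvUncond (k : Nat) (r : List String) (s : PySem.Set String) :
    (PySem.List.pyRange 0 ((r.length : Int) - (k : Int) + 1) 1).foldl (fun grams i =>
        PySem.Set.add grams (PySem.Str.join " " (PySem.List.slice r (some i) (some (i + (k : Int)))))) s
      = ((pvWinds k r).map (PySem.Str.join " ")).foldl PySem.Set.add s := by
  conv_lhs => rw [pvRange_eq, List.foldl_map]
  conv_rhs => rw [pvWinds, List.map_map, List.foldl_map]
  refine pvFoldl_congr _ _ _ s fun s' j => ?_
  rw [PySem.List.slice_natCast_add]
  rfl

-- A's conditional inner window loop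
theorem pvCond (k : Nat) (ws : List String) (s : PySem.Set String) :
    (PySem.List.pyRange 0 ((ws.length : Int) - (k : Int) + 1) 1).foldl (fun grams i =>
        if (PySem.List.slice ws (some i) (some (i + (k : Int)))).all pvP
        then PySem.Set.add grams (PySem.Str.join " " (PySem.List.slice ws (some i) (some (i + (k : Int)))))
        else grams) s
      = (((pvWinds k ws).filter (·.all pvP)).map (PySem.Str.join " ")).foldl PySem.Set.add s := by
  conv_lhs => rw [pvRange_eq, List.foldl_map]
  conv_rhs => rw [← pvFoldl_add_if (fun wd => wd.all pvP) (PySem.Str.join " ") (pvWinds k ws) s,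
    pvWinds, List.foldl_map]
  refine pvFoldl_congr _ _ _ s fun s' j => ?_
  rw [PySem.List.slice_natCast_add]

-- per-n equality of A's filtered pass and B's run-based pass
theorem pvPerN (k : Nat) (hk : 1 ≤ k) (ws : List String) (s : PySem.Set String) :
    (PySem.List.pyRange 0 ((ws.length : Int) - (k : Int) + 1) 1).foldl (fun grams i =>
        if (PySem.List.slice ws (some i) (some (i + (k : Int)))).all pvP
        then PySem.Set.add grams (PySem.Str.join " " (PySem.List.slice ws (some i) (some (i + (k : Int)))))
        else grams) s
      = (pvRuns ws).foldl (fun grams run =>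
          (PySem.List.pyRange 0 ((run.length : Int) - (k : Int) + 1) 1).foldl (fun grams i =>
            PySem.Set.add grams (PySem.Str.join " " (PySem.List.slice run (some i) (some (i + (k : Int)))))) grams) s := by
  rw [pvCond k ws s, pvCore k hk ws]
  induction pvRuns ws generalizing s with
  | nil => rfl
  | cons r rs ih =>
    rw [List.flatMap_cons, List.map_append, List.foldl_append, ih, List.foldl_cons, pvUncond]

theorem pvAB (ws : List String) : pvA ws = pvB ws := by
  unfold pvA pvB
  rw [pvFin_eq,
    show (fun w => (decide (2 < PySem.Str.len w))) = pvP from rfl]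
  simp only [List.foldl_cons, List.foldl_nil]
  rw [show ((2 : Int)) = ((2 : Nat) : Int) from rfl, show ((3 : Int)) = ((3 : Nat) : Int) from rfl,
    show ((4 : Int)) = ((4 : Nat) : Int) from rfl,
    pvPerN 2 (by norm_num), pvPerN 3 (by norm_num), pvPerN 4 (by norm_num)]

-- ===== VERDICT (by name: the statement is the Claim_ definition above) =====
theorem ngram_set_py_spec : Claim_equal_ngram_set_py := by
  intro text _
  unfold Spec_ngram_set_py
  rw [pvA_eq, pvB_eq, pvAB]
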